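-- pv_equiv track=rewrite | github.com/riyapatel2208/python | Python/unit 2/Pr13U2.py | find_duplicate_records
-- ===== SOURCE A (Python) =====
-- def find_duplicate_records(records):
--     seen = set()
--     duplicates = []
--     for r in records:
--         identifier = (r.get('name', ''), r.get('email', ''))
--         if identifier in seen:
--             duplicates.append(r)
--         else:
--             seen.add(identifier)
--     return duplicates
-- ===== SOURCE B (Python) =====
-- def find_duplicate_records(records):
--     # Two-pass: build a first-occurrence index table, then keep every record
--     # whose key's first occurrence is at an earlier index.
--     first = {}
--     for i, r in enumerate(records):
--         key = (r.get('name', ''), r.get('email', ''))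
--         if key not in first:
--             first[key] = i
--     return [r for i, r in enumerate(records)
--             if first[(r.get('name', ''), r.get('email', ''))] != i]
-- ===== Notes on version B (the rewrite author's own statement) =====
-- stated objective: alternative
-- what changed: Replaces the single running-seen-set scan with a two-pass scheme: first build a dict mapping each (name,email) key to the index of its first occurrence, then keep exactly the records whose index differs from their key's first index.
import Mathlib
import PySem

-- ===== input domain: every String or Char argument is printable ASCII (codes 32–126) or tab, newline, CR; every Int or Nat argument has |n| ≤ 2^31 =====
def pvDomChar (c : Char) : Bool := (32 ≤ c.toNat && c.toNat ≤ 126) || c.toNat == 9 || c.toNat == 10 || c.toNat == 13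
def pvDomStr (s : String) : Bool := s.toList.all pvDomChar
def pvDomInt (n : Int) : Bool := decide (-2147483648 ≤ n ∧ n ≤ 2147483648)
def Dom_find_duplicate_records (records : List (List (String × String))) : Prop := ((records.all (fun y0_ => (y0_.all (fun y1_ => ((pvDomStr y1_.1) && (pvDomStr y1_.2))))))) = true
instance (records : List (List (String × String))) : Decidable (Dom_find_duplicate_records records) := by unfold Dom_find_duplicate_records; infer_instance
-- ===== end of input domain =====

-- B replaces A's single running-seen-set scan by two passes: build a first-occurrence
-- index table, then keep the records whose index differs from their key's first index
-- (objective: alternative decomposition, same cost).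

-- ===== PORT A =====
-- r.get('name', '') on the record dict (assoc list, first match)
def pvKey (r : List (String × String)) : String × String :=
  ((PySem.Dict.mk r).getD "name" "", (PySem.Dict.mk r).getD "email" "")

def find_duplicate_records (records : List (List (String × String))) : List (List (String × String)) :=
  (records.foldl
    (fun (st : PySem.Set (String × String) × List (List (String × String))) r =>
      let identifier := pvKey r
      if PySem.Set.contains st.1 identifier then (st.1, st.2 ++ [r])
      else (PySem.Set.add st.1 identifier, st.2))
    (PySem.Set.empty, [])).2

-- ===== PORT B =====
def find_duplicate_records_alt (records : List (List (String × String))) : List (List (String × String)) :=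
  let first : PySem.Dict (String × String) Int :=
    (PySem.List.enumerate records).foldl
      (fun d p => if d.contains (pvKey p.2) then d else d.insert (pvKey p.2) p.1)
      PySem.Dict.empty
  -- first[key] != i : the key is always present, so get? ≠ some i is exact
  ((PySem.List.enumerate records).filter
      (fun p => first.get? (pvKey p.2) ≠ some p.1)).map Prod.snd

-- ===== PRECONDITION & SPEC =====
def Spec_find_duplicate_records (records : List (List (String × String))) (out : List (List (String × String))) : Prop := out = find_duplicate_records_alt records
instance (records : List (List (String × String))) (out : List (List (String × String))) : Decidable (Spec_find_duplicate_records records out) := by unfold Spec_find_duplicate_records; infer_instance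

-- ===== CLAIM (what is proved, stated in full; the proofs are below) =====
def Claim_equal_find_duplicate_records : Prop := ∀ (records : List (List (String × String))), Dom_find_duplicate_records records → Spec_find_duplicate_records records (find_duplicate_records records)

-- ===== LEMMAS AND PROOFS =====

-- abbreviations for the two fold steps (proof-side only)
def stepA (st : PySem.Set (String × String) × List (List (String × String)))
    (r : List (String × String)) : PySem.Set (String × String) × List (List (String × String)) :=
  if PySem.Set.contains st.1 (pvKey r) then (st.1, st.2 ++ [r])
  else (PySem.Set.add st.1 (pvKey r), st.2)

def stepD (d : PySem.Dict (String × String) Int) (p : Int × List (String × String)) :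
    PySem.Dict (String × String) Int :=
  if d.contains (pvKey p.2) then d else d.insert (pvKey p.2) p.1

-- A's seen component after the loop
theorem stepA_seen (rs : List (List (String × String)))
    (s : PySem.Set (String × String)) (acc : List (List (String × String))) :
    (rs.foldl stepA (s, acc)).1 = PySem.Set.update s (rs.map pvKey) := by
  induction rs generalizing s acc with
  | nil => simp [PySem.Set.update]
  | cons r rs ih =>
    simp only [List.foldl_cons, List.map_cons, stepA]
    by_cases h : PySem.Set.contains s (pvKey r) = true
    · have hadd : PySem.Set.add s (pvKey r) = s := by
        simp [PySem.Set.add, (PySem.Set.contains_iff s (pvKey r)).mp h]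
      rw [if_pos h, ih]
      simp [PySem.Set.update, hadd]
    · rw [if_neg h, ih]
      simp [PySem.Set.update]

-- A on rs ++ [r]
theorem A_append (rs : List (List (String × String))) (r : List (String × String)) :
    find_duplicate_records (rs ++ [r]) =
      find_duplicate_records rs ++
        (if pvKey r ∈ rs.map pvKey then [r] else []) := by
  unfold find_duplicate_records
  show (List.foldl stepA _ _).2 = (List.foldl stepA _ _).2 ++ _
  rw [List.foldl_append]
  simp only [List.foldl_cons, List.foldl_nil]
  set st := rs.foldl stepA (PySem.Set.empty, []) with hst
  have hseen : st.1 = PySem.Set.update PySem.Set.empty (rs.map pvKey) := stepA_seen _ _ _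
  have hmem : pvKey r ∈ st.1 ↔ pvKey r ∈ rs.map pvKey := by
    rw [hseen, PySem.Set.mem_update]
    simp [PySem.Set.empty]
  by_cases h : pvKey r ∈ rs.map pvKey
  · rw [if_pos h, stepA,
      if_pos ((PySem.Set.contains_iff st.1 (pvKey r)).mpr (hmem.mpr h))]
  · rw [if_neg h, stepA,
      if_neg (fun hc => h (hmem.mp ((PySem.Set.contains_iff st.1 (pvKey r)).mp hc)))]
    simp

-- Dict-build lemmas
theorem stepD_keys (ps : List (Int × List (String × String)))
    (d : PySem.Dict (String × String) Int) (k : String × String) :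
    ((ps.foldl stepD d).contains k = true) ↔
      (d.contains k = true ∨ k ∈ ps.map (fun p => pvKey p.2)) := by
  induction ps generalizing d with
  | nil => simp
  | cons p ps ih =>
    simp only [List.foldl_cons, stepD, List.map_cons, List.mem_cons]
    by_cases hc : d.contains (pvKey p.2) = true
    · rw [if_pos hc, ih]
      constructor
      · rintro (h | h)
        · exact Or.inl h
        · exact Or.inr (Or.inr h)
      · rintro (h | h | h)
        · exact Or.inl h
        · subst h; exact Or.inl hc
        · exact Or.inr h
    · rw [if_neg hc, ih]
      rw [PySem.Dict.contains_insert]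
      simp only [Bool.or_eq_true, beq_iff_eq]
      tauto

theorem stepD_values (ps : List (Int × List (String × String)))
    (d : PySem.Dict (String × String) Int) (k : String × String) (v : Int)
    (h : (ps.foldl stepD d).get? k = some v) :
    d.get? k = some v ∨ v ∈ ps.map Prod.fst := by
  induction ps generalizing d with
  | nil => exact Or.inl h
  | cons p ps ih =>
    simp only [List.foldl_cons, stepD] at h
    simp only [List.map_cons, List.mem_cons]
    by_cases hc : d.contains (pvKey p.2) = true
    · rw [if_pos hc] at h
      rcases ih d h with h' | h'
      · exact Or.inl h'
      · exact Or.inr (Or.inr h')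
    · rw [if_neg hc] at h
      rcases ih _ h with h' | h'
      · by_cases he : k = pvKey p.2
        · subst he
          rw [PySem.Dict.get?_insert_self] at h'
          exact Or.inr (Or.inl (Option.some.inj h').symm)
        · rw [PySem.Dict.get?_insert, if_neg he] at h'
          exact Or.inl h'
      · exact Or.inr (Or.inr h')

-- index bound for entries built from enumerate rs
theorem first_lt (rs : List (List (String × String))) (k : String × String) (v : Int)
    (h : ((PySem.List.enumerate rs).foldl stepD PySem.Dict.empty).get? k = some v) :
    v < (rs.length : Int) := by
  rcases stepD_values _ _ _ _ h with h' | h'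
  · simp [PySem.Dict.get?_empty] at h'
  · rcases List.mem_map.mp h' with ⟨p, hp, hv⟩
    rcases (PySem.List.mem_enumerate_iff rs 0 p).mp hp with ⟨j, hj, rfl⟩
    omega

theorem map_key_enumerate (rs : List (List (String × String))) :
    (PySem.List.enumerate rs).map (fun p => pvKey p.2) = rs.map pvKey := by
  rw [show (fun p : Int × List (String × String) => pvKey p.2) = pvKey ∘ Prod.snd from rfl,
    ← List.map_map, PySem.List.map_snd_enumerate]

-- B on rs ++ [r]
theorem B_append (rs : List (List (String × String))) (r : List (String × String)) :
    find_duplicate_records_alt (rs ++ [r]) =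
      find_duplicate_records_alt rs ++
        (if pvKey r ∈ rs.map pvKey then [r] else []) := by
  unfold find_duplicate_records_alt
  show ((PySem.List.enumerate (rs ++ [r])).filter
      (fun p => decide
        (((PySem.List.enumerate (rs ++ [r])).foldl stepD PySem.Dict.empty).get? (pvKey p.2)
          ≠ some p.1))).map Prod.snd =
    ((PySem.List.enumerate rs).filter
      (fun p => decide
        (((PySem.List.enumerate rs).foldl stepD PySem.Dict.empty).get? (pvKey p.2)
          ≠ some p.1))).map Prod.snd ++ _
  have he : PySem.List.enumerate (rs ++ [r]) =
      PySem.List.enumerate rs ++ [(((0 : Int) + rs.length), r)] := by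
    rw [PySem.List.enumerate_append, PySem.List.enumerate_cons, PySem.List.enumerate_nil]
  simp only [he, List.foldl_append, List.foldl_cons, List.foldl_nil]
  set n : Int := (0 : Int) + rs.length with hn
  set first := (PySem.List.enumerate rs).foldl stepD PySem.Dict.empty with hf
  have hkeys : ∀ k, first.contains k = true ↔ k ∈ rs.map pvKey := by
    intro k
    rw [hf, stepD_keys, map_key_enumerate]
    simp [PySem.Dict.contains_empty]
  set first' := stepD first (n, r) with hf'
  have hagree : ∀ p ∈ PySem.List.enumerate rs,
      first'.get? (pvKey p.2) = first.get? (pvKey p.2) := by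
    intro p hp
    have hkmem : pvKey p.2 ∈ rs.map pvKey := by
      rw [← map_key_enumerate rs]
      exact List.mem_map.mpr ⟨p, hp, rfl⟩
    rw [hf', stepD]
    by_cases hc : first.contains (pvKey r) = true
    · rw [if_pos hc]
    · rw [if_neg hc]
      have hne : pvKey p.2 ≠ pvKey r := by
        intro hkk
        exact hc ((hkeys (pvKey r)).mpr (hkk ▸ hkmem))
      rw [PySem.Dict.get?_insert, if_neg hne]
  have hfilter :
      (PySem.List.enumerate rs).filter (fun p => decide (first'.get? (pvKey p.2) ≠ some p.1)) =
      (PySem.List.enumerate rs).filter (fun p => decide (first.get? (pvKey p.2) ≠ some p.1)) := by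
    apply List.filter_congr
    intro p hp
    simp only [hagree p hp]
  rw [List.filter_append, hfilter, List.map_append]
  congr 1
  by_cases h : pvKey r ∈ rs.map pvKey
  · rw [if_pos h]
    have hc : first.contains (pvKey r) = true := (hkeys _).mpr h
    have hsome : (first.get? (pvKey r)).isSome = true := by
      rw [← PySem.Dict.contains_eq_isSome_get?]; exact hc
    rcases Option.isSome_iff_exists.mp hsome with ⟨v, hv⟩
    have hvlt : v < (rs.length : Int) := first_lt rs (pvKey r) v (by rw [← hf]; exact hv)
    have hg : first'.get? (pvKey r) = some v := by
      rw [hf', stepD, if_pos hc]; exact hv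
    simp only [List.filter_cons, List.filter_nil]
    rw [if_pos (by simp only [hg, decide_eq_true_eq]; intro hx; rw [Option.some_inj] at hx; omega)]
    rfl
  · rw [if_neg h]
    have hc : ¬ first.contains (pvKey r) = true := fun hcc => h ((hkeys _).mp hcc)
    have hg : first'.get? (pvKey r) = some n := by
      rw [hf', stepD, if_neg hc]
      exact PySem.Dict.get?_insert_self _ _ _
    simp only [List.filter_cons, List.filter_nil]
    rw [if_neg (by simp [hg])]
    rfl

theorem AB_eq (records : List (List (String × String))) :
    find_duplicate_records records = find_duplicate_records_alt records := by
  induction records using List.reverseRecOn with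
  | nil => rfl
  | append_singleton rs r ih => rw [A_append, B_append, ih]

-- ===== VERDICT (by name: the statement is the Claim_ definition above) =====
theorem find_duplicate_records_spec : Claim_equal_find_duplicate_records := by
  intro records _
  show find_duplicate_records records = find_duplicate_records_alt records
  exact AB_eq records
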